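-- pv_equiv track=rewrite | github.com/EoJin-Kim/CodingTest | 구현/파일명 정렬.py | NumberSort
-- ===== SOURCE A (Python) =====
-- def NumberSort(f):
--     number=""
--     numCheck=False
--
--     for x in range(len(f)):
--         if f[x].isdigit():
--             numCheck = True
--             number += f[x]
--         elif f[x].isalpha() and numCheck==True:
--             break
--     return int(number)
-- ===== SOURCE B (Python) =====
-- def NumberSort(f):
--     # Stage 1: split f into the maximal letter-free chunks (letters are separators).
--     chunks = ['']
--     for c in f:
--         if c.isalpha():
--             chunks.append('')
--         else:
--             chunks[-1] += c
--     # Stage 2: the answer is the digit subsequence of the first chunk containing a digit.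
--     digit_runs = (''.join(ch for ch in chunk if ch.isdigit()) for chunk in chunks)
--     return int(next((d for d in digit_runs if d), ''))
-- ===== Notes on version B (the rewrite author's own statement) =====
-- stated objective: alternative
-- what changed: Replaced A's single lazy scan with a numCheck flag and early break by a two-stage algorithm: first split the whole string into maximal letter-free chunks (letters are separators), then return the integer of the digits of the first chunk that contains a digit.
-- outside the precondition, e.g. on NumberSort('abc'): A raises ValueError, B raises ValueError; on NumberSort(''): A raises ValueError, B raises ValueError
import Mathlib
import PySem

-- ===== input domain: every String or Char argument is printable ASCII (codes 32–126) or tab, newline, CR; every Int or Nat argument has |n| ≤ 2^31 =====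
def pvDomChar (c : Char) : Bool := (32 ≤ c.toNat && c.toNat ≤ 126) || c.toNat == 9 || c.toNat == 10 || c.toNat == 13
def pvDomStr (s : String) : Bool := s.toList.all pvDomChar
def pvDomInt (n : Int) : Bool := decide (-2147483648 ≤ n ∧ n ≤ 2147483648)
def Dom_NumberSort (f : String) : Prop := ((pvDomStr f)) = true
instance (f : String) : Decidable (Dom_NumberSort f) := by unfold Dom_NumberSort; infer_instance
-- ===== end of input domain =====

-- B replaces A's lazy flag-and-break scan by a staged algorithm: split into letter-free chunks, then
-- take the digits of the first chunk containing a digit (alternative decomposition, same cost).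

-- ===== PORT A =====
-- the for-loop of A: state = (number, numCheck); 'break' returns the accumulator early
def pvLoopA : List Char → List Char → Bool → List Char
  | [], number, _ => number
  | c :: rest, number, numCheck =>
    if PySem.Chars.isdigit c then pvLoopA rest (number ++ [c]) true
    else if PySem.Chars.isalpha c && numCheck then number
    else pvLoopA rest number numCheck

-- int(number): under Pre_ the accumulator is a nonempty digit string, so ofChars? is some (.getD 0 unreachable)
def NumberSort (f : String) : Int :=
  (PySem.Int.ofChars? (pvLoopA f.toList [] false)).getD 0

-- ===== PORT B =====
-- stage 1 of Source B: split into maximal letter-free chunks (letters are separators); 'cur' is chunks[-1]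
def pvChunksB : List Char → List Char → List (List Char)
  | [], cur => [cur]
  | c :: rest, cur =>
    if PySem.Chars.isalpha c then cur :: pvChunksB rest []
    else pvChunksB rest (cur ++ [c])

-- stage 2 of Source B: first nonempty digit run among the chunks' digit subsequences (default '')
def pvFirstRunB : List (List Char) → List Char
  | [] => []
  | ch :: rest =>
    let d := ch.filter PySem.Chars.isdigit
    if d ≠ [] then d else pvFirstRunB rest

def NumberSort_alt (f : String) : Int :=
  (PySem.Int.ofChars? (pvFirstRunB (pvChunksB f.toList []))).getD 0

-- ===== PRECONDITION & SPEC =====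
-- Pre_ excludes exactly the strings with no digit, on which A's int('') raises ValueError (B raises there too).
def Pre_NumberSort (f : String) : Prop := f.toList.any PySem.Chars.isdigit = true
instance (f : String) : Decidable (Pre_NumberSort f) := by unfold Pre_NumberSort; infer_instance
def pvWitness_NumberSort : String := "file-12 3a9.txt"

def Spec_NumberSort (f : String) (out : Int) : Prop := out = NumberSort_alt f
instance (f : String) (out : Int) : Decidable (Spec_NumberSort f out) := by unfold Spec_NumberSort; infer_instance

-- ===== CLAIM (what is proved, stated in full; the proofs are below) =====
def Claim_equal_NumberSort : Prop := ∀ (f : String), Dom_NumberSort f → Pre_NumberSort f → Spec_NumberSort f (NumberSort f)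

-- ===== LEMMAS AND PROOFS =====

theorem digit_not_alpha (c : Char) (h : PySem.Chars.isdigit c = true) :
    PySem.Chars.isalpha c = false := by
  unfold PySem.Chars.isdigit at h
  unfold PySem.Chars.isalpha PySem.Chars.isupper PySem.Chars.islower
  simp only [Bool.and_eq_true, decide_eq_true_eq, Char.le_def, UInt32.le_iff_toNat_le] at h
  simp only [Bool.or_eq_false_iff, Bool.and_eq_false_iff, decide_eq_false_iff_not, Char.le_def,
    UInt32.le_iff_toNat_le,
    show '0'.val.toNat = 48 from rfl, show '9'.val.toNat = 57 from rfl,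
    show 'A'.val.toNat = 65 from rfl, show 'Z'.val.toNat = 90 from rfl,
    show 'a'.val.toNat = 97 from rfl, show 'z'.val.toNat = 122 from rfl] at *
  omega

-- once A's flag is true, A collects the digits of the longest alpha-free remainder prefix
theorem pvLoopA_true_run (cs : List Char) (acc : List Char) :
    pvLoopA cs acc true =
      acc ++ (cs.takeWhile (fun c => !PySem.Chars.isalpha c)).filter PySem.Chars.isdigit := by
  induction cs generalizing acc with
  | nil => simp [pvLoopA]
  | cons c rest ih =>
    by_cases hd : PySem.Chars.isdigit c = true
    · have ha := digit_not_alpha c hd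
      simp [pvLoopA, hd, ha, List.takeWhile, ih]
    · simp only [Bool.not_eq_true] at hd
      by_cases ha : PySem.Chars.isalpha c = true
      · simp [pvLoopA, hd, ha, List.takeWhile]
      · simp only [Bool.not_eq_true] at ha
        simp [pvLoopA, hd, ha, List.takeWhile, ih]

-- once a digit has entered the current chunk, B returns that chunk's digits plus the digits of the
-- alpha-free continuation — the same run A collects
theorem pvChunksB_true_run (cs : List Char) (cur : List Char)
    (h : cur.filter PySem.Chars.isdigit ≠ []) :
    pvFirstRunB (pvChunksB cs cur) =
      cur.filter PySem.Chars.isdigit ++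
        (cs.takeWhile (fun c => !PySem.Chars.isalpha c)).filter PySem.Chars.isdigit := by
  induction cs generalizing cur with
  | nil => simp [pvChunksB, pvFirstRunB, h]
  | cons c rest ih =>
    by_cases ha : PySem.Chars.isalpha c = true
    · have hd : PySem.Chars.isdigit c = false := by
        by_cases hdc : PySem.Chars.isdigit c = true
        · exact absurd ha (by simp [digit_not_alpha c hdc])
        · simpa using hdc
      simp [pvChunksB, pvFirstRunB, ha, h, List.takeWhile]
    · simp only [Bool.not_eq_true] at ha
      have h' : (cur ++ [c]).filter PySem.Chars.isdigit ≠ [] := by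
        simp only [List.filter_append]
        intro hc; exact h (by simpa using (List.append_eq_nil_iff.mp hc).1)
      rw [pvChunksB]
      simp only [ha, Bool.false_eq_true, if_false]
      rw [ih _ h']
      simp [List.takeWhile, ha, List.filter_append]
      by_cases hd : PySem.Chars.isdigit c = true <;> simp [hd]

-- while the current chunk is digit-free, B's result is the pipeline over the remaining characters
theorem pvChunksB_false_run (cs : List Char) (cur : List Char)
    (h : cur.filter PySem.Chars.isdigit = []) :
    pvFirstRunB (pvChunksB cs cur) =
      ((cs.dropWhile (fun c => !PySem.Chars.isdigit c)).takeWhile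
        (fun c => !PySem.Chars.isalpha c)).filter PySem.Chars.isdigit := by
  induction cs generalizing cur with
  | nil => simp [pvChunksB, pvFirstRunB, h]
  | cons c rest ih =>
    by_cases hd : PySem.Chars.isdigit c = true
    · have ha := digit_not_alpha c hd
      have h' : (cur ++ [c]).filter PySem.Chars.isdigit ≠ [] := by
        simp [List.filter_append, h, hd]
      rw [pvChunksB]
      simp only [ha, Bool.false_eq_true, if_false]
      rw [pvChunksB_true_run _ _ h']
      simp [List.dropWhile, hd, ha, List.filter_append, h]
    · simp only [Bool.not_eq_true] at hd
      by_cases ha : PySem.Chars.isalpha c = true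
      · simp [pvChunksB, pvFirstRunB, ha, h, List.dropWhile, hd, ih [] (by simp)]
      · simp only [Bool.not_eq_true] at ha
        have h' : (cur ++ [c]).filter PySem.Chars.isdigit = [] := by
          simp [List.filter_append, h, hd]
        simp [pvChunksB, ha, List.dropWhile, hd, ih _ h']

-- with the flag still false, A skips exactly the leading non-digit characters
theorem pvLoopA_false_dropWhile (cs : List Char) (acc : List Char) :
    pvLoopA cs acc false = pvLoopA (cs.dropWhile (fun c => !PySem.Chars.isdigit c)) acc false := by
  induction cs with
  | nil => rfl
  | cons c rest ih =>
    by_cases hd : PySem.Chars.isdigit c = true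
    · simp [List.dropWhile, hd]
    · simp only [Bool.not_eq_true] at hd
      simp [pvLoopA, List.dropWhile, hd, ih]

theorem pvLoopA_eq_pipeline (cs : List Char) :
    pvLoopA cs [] false =
      ((cs.dropWhile (fun c => !PySem.Chars.isdigit c)).takeWhile
        (fun c => !PySem.Chars.isalpha c)).filter PySem.Chars.isdigit := by
  rw [pvLoopA_false_dropWhile]
  cases h : cs.dropWhile (fun c => !PySem.Chars.isdigit c) with
  | nil => rfl
  | cons d rest =>
    have hd : PySem.Chars.isdigit d = true := by
      have := List.head_dropWhile_not (p := fun c => !PySem.Chars.isdigit c) (l := cs)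
        (by simp [h])
      simpa [h] using this
    have ha := digit_not_alpha d hd
    simp [pvLoopA, hd, ha, List.takeWhile, pvLoopA_true_run]

-- ===== VERDICT (by name: the statement is the Claim_ definition above) =====
theorem NumberSort_spec : Claim_equal_NumberSort := by
  intro f _ _
  unfold Spec_NumberSort NumberSort NumberSort_alt
  rw [pvLoopA_eq_pipeline, pvChunksB_false_run _ _ rfl]
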